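-- pv_equiv track=rewrite | github.com/Wallacoloo/mooooo.ooo | src/page_info.py | filter_into_tag
-- ===== SOURCE A (Python) =====
-- def filter_into_tag(value):
--     """Given some text, this returns a human-readable tag that closely
--     corresponds to the text but is safe to use in a URL.
--     Example:
--     >>> filter_into_tag("Hello, This is Arnold")
--     "hello-this-is-arnold"
--     """
--     # Replace punctuation with hyphens
--     value = value.replace(" ", "-").replace("/", "-").replace(",", "-") \
--         .replace(".", "-").replace("!", "-").replace(";", "-") \
--         .replace(":", "-").strip()
--     # Preserve only alphanumerics and hyphens
--     value = "".join(char.lower() for char in value if char.lower() in "abcdefghijklmnopqrstuvwxyz0123456789-")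
--     # Squash pairs of hyphens
--     while len(value) != len(value.replace("--", "-")):
--             value = value.replace("--", "-")
--
--     return value
-- ===== SOURCE B (Python) =====
-- def filter_into_tag(value):
--     """Single left-to-right pass: separators and literal hyphens become one
--     collapsed hyphen, ascii alphanumerics are kept lowercased, all else dropped."""
--     out = []
--     prev_hyphen = False
--     for ch in value:
--         if ch in " /,.!;:-":
--             if not prev_hyphen:
--                 out.append("-")
--                 prev_hyphen = True
--         else:
--             low = ch.lower()
--             if low in "abcdefghijklmnopqrstuvwxyz0123456789":
--                 out.append(low)
--                 prev_hyphen = False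
--     return "".join(out)
-- ===== Notes on version B (the rewrite author's own statement) =====
-- stated objective: alternative
-- what changed: Replaces A's multi-phase pipeline (seven whole-string replace passes, strip, a filter/lower pass, then a repeated squash loop collapsing doubled hyphens) by one left-to-right pass that classifies each character and collapses hyphen runs on the fly with a previous-was-hyphen flag.
import Mathlib
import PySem

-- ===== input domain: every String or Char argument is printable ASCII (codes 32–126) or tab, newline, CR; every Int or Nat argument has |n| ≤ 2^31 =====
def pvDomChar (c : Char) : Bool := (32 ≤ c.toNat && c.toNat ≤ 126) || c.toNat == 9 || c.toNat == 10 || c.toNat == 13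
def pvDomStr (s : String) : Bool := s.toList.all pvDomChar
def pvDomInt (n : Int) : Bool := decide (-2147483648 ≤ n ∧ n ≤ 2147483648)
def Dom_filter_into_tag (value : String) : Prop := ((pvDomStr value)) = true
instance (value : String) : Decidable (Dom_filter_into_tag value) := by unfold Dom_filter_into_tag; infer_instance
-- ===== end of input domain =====

-- B fuses A's replace/strip/filter/squash phases into one left-to-right pass with a
-- previous-was-hyphen flag; alternative decomposition, same observable result.

-- ===== PORT A =====
-- All string work is ported on the list-of-chars side (PySem.Str.f s = PySem.Chars.f s.toList, "abc".toList = ['a','b','c']), exact.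
def pvKeep : List Char := ['a','b','c','d','e','f','g','h','i','j','k','l','m','n','o','p','q','r','s','t','u','v','w','x','y','z','0','1','2','3','4','5','6','7','8','9','-']

-- length bound on one '--'→'-' replace pass, used only for pvSquash's termination
theorem pvGoDD_len (fuel : Nat) : ∀ (l acc : List Char),
    (PySem.Chars.replace.go ['-','-'] ['-'] fuel l acc).length ≤ acc.length + l.length := by
  induction fuel with
  | zero => intro l acc; simp [PySem.Chars.replace.go]
  | succ f ih =>
    intro l acc
    cases l with
    | nil => simp [PySem.Chars.replace.go]
    | cons c t =>
      rw [PySem.Chars.replace.go]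
      split
      · have h1 := ih (List.drop ['-','-'].length (c :: t)) (['-'].reverse ++ acc)
        have h2 : (List.drop ['-','-'].length (c :: t)).length ≤ t.length := by
          simp
        simp at h1 h2 ⊢
        omega
      · have h1 := ih t (c :: acc)
        simp at h1 ⊢
        omega

theorem pvReplaceDD_len (w : List Char) :
    (PySem.Chars.replace w ['-','-'] ['-']).length ≤ w.length := by
  have h : (['-','-'] : List Char).isEmpty = false := rfl
  rw [PySem.Chars.replace, h]
  simpa using pvGoDD_len w.length w []

-- the while-loop: while len(v) != len(v.replace("--","-")): v = v.replace("--","-")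
def pvSquash (v : List Char) : List Char :=
  if (PySem.Chars.replace v ['-','-'] ['-']).length ≠ v.length
  then pvSquash (PySem.Chars.replace v ['-','-'] ['-'])
  else v
termination_by v.length
decreasing_by
  have := pvReplaceDD_len v
  omega

def filter_into_tag (value : String) : String :=
  let v1 := PySem.Chars.strip
    (PySem.Chars.replace (PySem.Chars.replace (PySem.Chars.replace (PySem.Chars.replace
      (PySem.Chars.replace (PySem.Chars.replace (PySem.Chars.replace value.toList
        [' '] ['-']) ['/'] ['-']) [','] ['-']) ['.'] ['-']) ['!'] ['-']) [';'] ['-']) [':'] ['-'])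
  let v2 := PySem.Chars.join []
    ((v1.filter (fun ch => PySem.Chars.isIn (PySem.Chars.lower [ch]) pvKeep)).map
      (fun ch => PySem.Chars.lower [ch]))
  String.ofList (pvSquash v2)

-- ===== PORT B =====
def pvSeps : List Char := [' ','/',',','.','!',';',':','-']
def pvAlnum : List Char := ['a','b','c','d','e','f','g','h','i','j','k','l','m','n','o','p','q','r','s','t','u','v','w','x','y','z','0','1','2','3','4','5','6','7','8','9']

def pvStep (st : List Char × Bool) (ch : Char) : List Char × Bool :=
  if PySem.Chars.isIn [ch] pvSeps then
    if st.2 then st else (st.1 ++ ['-'], true)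
  else
    let low := PySem.Chars.lower [ch]
    if PySem.Chars.isIn low pvAlnum then (st.1 ++ low, false) else st

def filter_into_tag_alt (value : String) : String :=
  String.ofList (value.toList.foldl pvStep ([], false)).1

-- ===== PRECONDITION & SPEC =====
def Spec_filter_into_tag (value : String) (out : String) : Prop := out = filter_into_tag_alt value
instance (value : String) (out : String) : Decidable (Spec_filter_into_tag value out) := by unfold Spec_filter_into_tag; infer_instance

-- ===== CLAIM (what is proved, stated in full; the proofs are below) =====
def Claim_equal_filter_into_tag : Prop := ∀ (value : String), Dom_filter_into_tag value → Spec_filter_into_tag value (filter_into_tag value)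

-- ===== LEMMAS AND PROOFS =====

-- `c in s` for a single character is list membership
theorem pvIsIn_singleton (c : Char) (s : List Char) :
    PySem.Chars.isIn [c] s = true ↔ c ∈ s := by
  rw [PySem.Chars.isIn_iff_infix, List.singleton_infix_iff]

theorem pvLower_singleton (c : Char) :
    PySem.Chars.lower [c] = [PySem.Chars.lowerChar c] := rfl

theorem pvToNat_ofNat (n : Nat) (h : n < 55296) : (Char.ofNat n).toNat = n := by
  unfold Char.ofNat
  split
  · rfl
  · rename_i h2; exact absurd (Or.inl (by omega)) h2

theorem pvLowerChar_hyphen (c : Char) (h : PySem.Chars.lowerChar c = '-') : c = '-' := by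
  by_cases hu : PySem.Chars.isupper c = true
  · exfalso
    have hb : 65 ≤ c.toNat ∧ c.toNat ≤ 90 := by
      simpa [PySem.Chars.isupper, Char.le_def] using hu
    have : (PySem.Chars.lowerChar c).toNat = c.toNat + 32 := by
      simp [PySem.Chars.lowerChar, hu, pvToNat_ofNat (c.toNat + 32) (by omega)]
    rw [h] at this
    rw [show ('-' : Char).toNat = 45 from rfl] at this
    omega
  · simpa [PySem.Chars.lowerChar, hu] using h

-- the combined effect of the seven single-character replaces
def pvF (c : Char) : Char := if c ∈ [' ','/',',','.','!',';',':'] then '-' else c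

theorem pvF_eq (c : Char) :
    (fun c => if c = ':' then '-' else c)
    ((fun c => if c = ';' then '-' else c)
    ((fun c => if c = '!' then '-' else c)
    ((fun c => if c = '.' then '-' else c)
    ((fun c => if c = ',' then '-' else c)
    ((fun c => if c = '/' then '-' else c)
    ((fun c => if c = ' ' then '-' else c) c)))))) = pvF c := by
  by_cases h : c ∈ [' ','/',',','.','!',';',':']
  · fin_cases h <;> rfl
  · simp only [List.mem_cons, List.not_mem_nil, or_false, not_or] at h
    obtain ⟨h1, h2, h3, h4, h5, h6, h7⟩ := h
    simp [pvF, h1, h2, h3, h4, h5, h6, h7]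

-- one replace pass with old = "--"
def pvRep : List Char → List Char
  | '-' :: '-' :: t => '-' :: pvRep t
  | c :: t => c :: pvRep t
  | [] => []

theorem pvRep_cons_ne (c : Char) (t : List Char) (hc : c ≠ '-') :
    pvRep (c :: t) = c :: pvRep t := by
  rw [pvRep.eq_def]
  rcases t with _ | ⟨d, t'⟩ <;> simp [hc]

theorem pvRep_hyphen_cons_ne (d : Char) (t : List Char) (hd : d ≠ '-') :
    pvRep ('-' :: d :: t) = '-' :: pvRep (d :: t) := by
  rw [pvRep.eq_def]; simp [hd]

theorem pvRep_cons₂ (c : Char) (t : List Char)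
    (hne : ∀ t', ¬(c = '-' ∧ t = '-' :: t')) :
    pvRep (c :: t) = c :: pvRep t := by
  by_cases hc : c = '-'
  · subst hc
    rcases t with _ | ⟨d, t'⟩
    · rfl
    · have hd : d ≠ '-' := fun hd => hne t' ⟨rfl, by rw [hd]⟩
      exact pvRep_hyphen_cons_ne d t' hd
  · exact pvRep_cons_ne c t hc

-- collapse runs of '-' given whether the previous emitted char was '-'
def pvCollapse : List Char → Bool → List Char
  | [], _ => []
  | c :: t, prev =>
    if c = '-' then (if prev then pvCollapse t true else '-' :: pvCollapse t true)
    else c :: pvCollapse t false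

-- B's pass, without the accumulator
def pvCanon : List Char → Bool → List Char
  | [], _ => []
  | c :: t, prev =>
    if c ∈ pvSeps then (if prev then pvCanon t true else '-' :: pvCanon t true)
    else if PySem.Chars.lowerChar c ∈ pvAlnum then PySem.Chars.lowerChar c :: pvCanon t false
    else pvCanon t prev

theorem pvFoldl_step (l : List Char) : ∀ (acc : List Char) (prev : Bool),
    (l.foldl pvStep (acc, prev)).1 = acc ++ pvCanon l prev := by
  induction l with
  | nil => intro acc prev; simp [pvCanon]
  | cons c t ih =>
    intro acc prev
    by_cases hm : c ∈ pvSeps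
    · have hb : PySem.Chars.isIn [c] pvSeps = true := (pvIsIn_singleton c pvSeps).mpr hm
      cases prev with
      | true => simp [pvStep, hb, pvCanon, hm, ih]
      | false => simp [pvStep, hb, pvCanon, hm, ih]
    · have hb : PySem.Chars.isIn [c] pvSeps = false := by
        rw [Bool.eq_false_iff]; exact fun hh => hm ((pvIsIn_singleton c pvSeps).mp hh)
      by_cases ha : PySem.Chars.lowerChar c ∈ pvAlnum
      · have hab : PySem.Chars.isIn [PySem.Chars.lowerChar c] pvAlnum = true :=
          (pvIsIn_singleton _ _).mpr ha
        simp [pvStep, hb, hab, pvCanon, hm, ha, ih, pvLower_singleton]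
      · have hab : PySem.Chars.isIn (PySem.Chars.lower [c]) pvAlnum = false := by
          rw [pvLower_singleton, Bool.eq_false_iff]
          exact fun hh => ha ((pvIsIn_singleton _ _).mp hh)
        simp [pvStep, hb, hab, pvCanon, hm, ha, ih]

theorem pvGoSingle (a b : Char) (fuel : Nat) : ∀ (l acc : List Char), l.length ≤ fuel →
    PySem.Chars.replace.go [a] [b] fuel l acc
      = acc.reverse ++ l.map (fun c => if c = a then b else c) := by
  induction fuel with
  | zero => intro l acc h
            have : l = [] := List.eq_nil_of_length_eq_zero (by omega)
            subst this; simp [PySem.Chars.replace.go]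
  | succ f ih =>
    intro l acc h
    cases l with
    | nil => simp [PySem.Chars.replace.go]
    | cons c t =>
      rw [PySem.Chars.replace.go]
      by_cases hc : c = a
      · subst hc
        have hp : [c].isPrefixOf (c :: t) = true := by simp [List.isPrefixOf]
        simp only [hp, if_pos, List.length_cons, List.length_nil, List.drop_succ_cons,
          List.drop_zero, List.reverse_singleton, List.singleton_append]
        rw [ih t (b :: acc) (by simp at h ⊢; omega)]
        simp
      · have hp : [a].isPrefixOf (c :: t) = false := by
          simp [List.isPrefixOf]; exact fun hh => hc hh.symm
        simp only [hp, Bool.false_eq_true, if_false]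
        rw [ih t (c :: acc) (by simp at h ⊢; omega)]
        simp [hc]

theorem pvReplaceSingle (a b : Char) (l : List Char) :
    PySem.Chars.replace l [a] [b] = l.map (fun c => if c = a then b else c) := by
  have h : ([a] : List Char).isEmpty = false := rfl
  rw [PySem.Chars.replace, h]
  simpa using pvGoSingle a b l.length l [] le_rfl

theorem pvGoDD (fuel : Nat) : ∀ (l acc : List Char), l.length ≤ fuel →
    PySem.Chars.replace.go ['-','-'] ['-'] fuel l acc = acc.reverse ++ pvRep l := by
  induction fuel with
  | zero => intro l acc h
            have : l = [] := List.eq_nil_of_length_eq_zero (by omega)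
            subst this; simp [PySem.Chars.replace.go, pvRep]
  | succ f ih =>
    intro l acc h
    cases l with
    | nil => simp [PySem.Chars.replace.go, pvRep]
    | cons c t =>
      by_cases hc : c = '-'
      · subst hc
        cases t with
        | nil =>
          rw [PySem.Chars.replace.go]
          have hp : ['-','-'].isPrefixOf ['-'] = false := by decide
          simp only [hp, Bool.false_eq_true, if_false]
          rw [ih [] ('-' :: acc) (by simp)]
          simp [pvRep]
        | cons d t' =>
          by_cases hd : d = '-'
          · subst hd
            rw [PySem.Chars.replace.go]
            have hp : ['-','-'].isPrefixOf ('-' :: '-' :: t') = true := by simp [List.isPrefixOf]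
            simp only [hp, if_pos, List.length_cons, List.length_nil, List.drop_succ_cons,
              List.drop_zero, List.reverse_cons, List.reverse_nil, List.nil_append,
              List.singleton_append]
            rw [ih t' ('-' :: acc) (by simp at h ⊢; omega)]
            simp [pvRep]
          · rw [PySem.Chars.replace.go]
            have hp : ['-','-'].isPrefixOf ('-' :: d :: t') = false := by
              simp [List.isPrefixOf]; exact fun hh => hd hh.symm
            simp only [hp, Bool.false_eq_true, if_false]
            rw [ih (d :: t') ('-' :: acc) (by simp at h ⊢; omega)]
            rw [pvRep_hyphen_cons_ne d t' hd]
            simp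
      · rw [PySem.Chars.replace.go]
        have hp : ['-','-'].isPrefixOf (c :: t) = false := by
          cases t <;> simp [List.isPrefixOf] <;> exact fun hh => absurd hh.symm hc
        simp only [hp, Bool.false_eq_true, if_false]
        rw [ih t (c :: acc) (by simp at h ⊢; omega)]
        rw [pvRep_cons_ne c t hc]
        simp

theorem pvReplaceDD (w : List Char) : PySem.Chars.replace w ['-','-'] ['-'] = pvRep w := by
  have h : (['-','-'] : List Char).isEmpty = false := rfl
  rw [PySem.Chars.replace, h]
  simpa using pvGoDD w.length w [] le_rfl

theorem pvRep_len (w : List Char) : (pvRep w).length ≤ w.length := by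
  induction w using pvRep.induct <;> simp [pvRep] <;> omega

theorem pvRep_fix_of_len (w : List Char) (h : (pvRep w).length = w.length) : pvRep w = w := by
  induction w using pvRep.induct with
  | case1 t ih =>
    exfalso; have := pvRep_len t; simp [pvRep] at h; omega
  | case2 c t hne ih =>
    rw [pvRep_cons₂ c t (fun t' hh => hne t' hh.1 hh.2)] at h ⊢
    simp at h
    rw [ih h]
  | case3 => rfl

theorem pvCollapse_rep (w : List Char) : ∀ prev, pvCollapse (pvRep w) prev = pvCollapse w prev := by
  induction w using pvRep.induct with
  | case1 t ih =>
    intro prev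
    simp only [pvRep, pvCollapse, if_pos]
    cases prev <;> simp [ih]
  | case2 c t hne ih =>
    intro prev
    rw [pvRep_cons₂ c t (fun t' hh => hne t' hh.1 hh.2)]
    by_cases hc : c = '-' <;> cases prev <;> simp [pvCollapse, hc, ih]
  | case3 => intro prev; rfl

theorem pvCollapse_fix (w : List Char) (h : pvRep w = w) :
    pvCollapse w false = w ∧ (w.head? ≠ some '-' → pvCollapse w true = w) := by
  induction w using pvRep.induct with
  | case1 t ih =>
    exfalso
    have hlen : (pvRep ('-' :: '-' :: t)).length = ('-' :: '-' :: t).length := by rw [h]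
    have := pvRep_len t
    simp [pvRep] at hlen
    omega
  | case2 c t hne ih =>
    rw [pvRep_cons₂ c t (fun t' hh => hne t' hh.1 hh.2)] at h
    have ht : pvRep t = t := by injection h
    obtain ⟨ih1, ih2⟩ := ih ht
    by_cases hc : c = '-'
    · subst hc
      have hhead : t.head? ≠ some '-' := by
        intro hh
        rcases t with _ | ⟨d, t'⟩
        · simp at hh
        · simp at hh
          exact hne t' rfl (by rw [hh])
      constructor
      · simp [pvCollapse, ih2 hhead]
      · intro hh; simp at hh
    · constructor
      · simp [pvCollapse, hc, ih1]
      · intro _; simp [pvCollapse, hc, ih1]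
  | case3 => exact ⟨rfl, fun _ => rfl⟩

theorem pvSquash_collapse (w : List Char) : pvSquash w = pvCollapse w false := by
  induction w using pvSquash.induct with
  | case1 v hne ih =>
    rw [pvSquash, if_pos hne, ih, pvReplaceDD, pvCollapse_rep]
  | case2 v heq =>
    rw [pvSquash, if_neg heq]
    rw [pvReplaceDD] at heq
    have hfix : pvRep v = v := pvRep_fix_of_len v (by omega)
    exact (pvCollapse_fix v hfix).1.symm

-- dropped whitespace never passes the keep filter
theorem pvFilter_dropWhile (p q : Char → Bool) (h : ∀ c, q c = true → p c = false) :
    ∀ l : List Char, (l.dropWhile q).filter p = l.filter p := by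
  intro l
  induction l with
  | nil => rfl
  | cons c t ih =>
    by_cases hq : q c = true
    · rw [List.dropWhile_cons_of_pos hq, ih, List.filter_cons_of_neg (by simp [h c hq])]
    · rw [List.dropWhile_cons_of_neg (by simp [hq])]

theorem pvKeep_not_space (c : Char) (h : PySem.Chars.isspace c = true) :
    PySem.Chars.lowerChar c ∉ pvKeep := by
  intro hmem
  by_cases hu : PySem.Chars.isupper c = true
  · have hb : 65 ≤ c.toNat ∧ c.toNat ≤ 90 := by
      simpa [PySem.Chars.isupper, Char.le_def] using hu
    simp [PySem.Chars.isspace] at h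
    omega
  · rw [show PySem.Chars.lowerChar c = c from by simp [PySem.Chars.lowerChar, hu]] at hmem
    have hall : pvKeep.all (fun d => !PySem.Chars.isspace d) = true := by decide
    have := (List.all_eq_true.mp hall) c hmem
    simp [h] at this

theorem pvFilter_strip (u : List Char) :
    (PySem.Chars.strip u).filter (fun ch => PySem.Chars.isIn (PySem.Chars.lower [ch]) pvKeep)
      = u.filter (fun ch => PySem.Chars.isIn (PySem.Chars.lower [ch]) pvKeep) := by
  have hpq : ∀ c, PySem.Chars.isspace c = true →
      (PySem.Chars.isIn (PySem.Chars.lower [c]) pvKeep) = false := by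
    intro c hc
    rw [pvLower_singleton, Bool.eq_false_iff]
    exact fun hh => pvKeep_not_space c hc ((pvIsIn_singleton _ _).mp hh)
  rw [PySem.Chars.strip, PySem.Chars.rstrip, PySem.Chars.lstrip, List.filter_reverse,
    pvFilter_dropWhile _ _ hpq, List.filter_reverse, List.reverse_reverse,
    pvFilter_dropWhile _ _ hpq]

theorem pvCollapse_canon (cs : List Char) : ∀ prev,
    pvCollapse (((cs.map pvF).filter
        (fun ch => PySem.Chars.isIn (PySem.Chars.lower [ch]) pvKeep)).map PySem.Chars.lowerChar) prev
      = pvCanon cs prev := by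
  induction cs with
  | nil => intro prev; rfl
  | cons c t ih =>
    intro prev
    by_cases hm : c ∈ pvSeps
    · have hF : pvF c = '-' := by fin_cases hm <;> rfl
      have hP : PySem.Chars.isIn (PySem.Chars.lower ['-']) pvKeep = true := by decide
      have hl : PySem.Chars.lowerChar '-' = '-' := by decide
      cases prev <;>
        simp [List.map_cons, hF, hP, hl, pvCollapse, pvCanon, hm, ih]
    · have hF : pvF c = c := by
        rw [pvF, if_neg]
        intro hh
        exact hm (by fin_cases hh <;> simp [pvSeps])
      have hnd : c ≠ '-' := fun hh => hm (by rw [hh]; simp [pvSeps])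
      by_cases ha : PySem.Chars.lowerChar c ∈ pvAlnum
      · have hP : PySem.Chars.isIn (PySem.Chars.lower [c]) pvKeep = true := by
          rw [pvLower_singleton]
          refine (pvIsIn_singleton _ _).mpr ?_
          rw [show pvKeep = pvAlnum ++ ['-'] from rfl, List.mem_append]
          exact Or.inl ha
        have hlnd : PySem.Chars.lowerChar c ≠ '-' := by
          intro hh; rw [hh] at ha; exact absurd ha (by decide)
        simp [List.map_cons, hF, hP, pvCollapse, pvCanon, hm, ha, hlnd, ih]
      · have hlk : PySem.Chars.lowerChar c ∉ pvKeep := by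
          intro hh
          rw [show pvKeep = pvAlnum ++ ['-'] from rfl, List.mem_append] at hh
          rcases hh with h1 | h1
          · exact ha h1
          · exact hnd (pvLowerChar_hyphen c (by simpa using h1))
        have hP : PySem.Chars.isIn (PySem.Chars.lower [c]) pvKeep = false := by
          rw [pvLower_singleton, Bool.eq_false_iff]
          exact fun hh => hlk ((pvIsIn_singleton _ _).mp hh)
        simp only [List.map_cons, List.filter_cons, hF, hP, Bool.false_eq_true, if_false,
          pvCanon, if_neg hm, if_neg ha]
        exact ih prev

-- ===== VERDICT (by name: the statement is the Claim_ definition above) =====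
theorem filter_into_tag_spec : Claim_equal_filter_into_tag := by
  intro value _
  unfold Spec_filter_into_tag filter_into_tag filter_into_tag_alt
  simp only []
  rw [pvReplaceSingle, pvReplaceSingle, pvReplaceSingle, pvReplaceSingle, pvReplaceSingle,
    pvReplaceSingle, pvReplaceSingle, List.map_map, List.map_map, List.map_map, List.map_map,
    List.map_map, List.map_map]
  simp only [Function.comp_def]
  rw [List.map_congr_left (fun a _ => pvF_eq a)]
  have hjoin : ∀ xs : List Char,
      PySem.Chars.join [] (xs.map (fun ch => PySem.Chars.lower [ch]))
        = xs.map PySem.Chars.lowerChar := by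
    intro xs
    have : xs.map (fun ch => PySem.Chars.lower [ch])
        = (xs.map PySem.Chars.lowerChar).map (fun c => [c]) := by
      rw [List.map_map]; rfl
    rw [this, PySem.Chars.join_nil_singletons]
  rw [hjoin, pvFilter_strip, pvSquash_collapse, pvCollapse_canon]
  rw [pvFoldl_step value.toList [] false, List.nil_append]
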